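-- pv_equiv track=rewrite | github.com/luneto10/Study | misc/Data Structure & Algorithms/Homework_310/teste.py | findDuplicateElementCount
-- ===== SOURCE A (Python) =====
-- def findDuplicateElementCount(arr, low, high, s):
--     if low == high:
--         if arr[low] == s:
--             return 1
--         else:
--             return 0
--     mid = (low + high) // 2
--     left = findDuplicateElementCount(arr, low, mid, s)
--     right = findDuplicateElementCount(arr, mid + 1, high, s)
--     return left + right
-- ===== SOURCE B (Python) =====
-- def findDuplicateElementCount(arr, low, high, s):
--     # flat linear scan of the inclusive (by contract nonempty) range [low, high]
--     count = 0
--     i = low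
--     while True:
--         if arr[i] == s:
--             count += 1
--         if i == high:
--             return count
--         i += 1
-- ===== Notes on version B (the rewrite author's own statement) =====
-- stated objective: simpler
-- what changed: Replaces the divide-and-conquer recursion (split the range at the midpoint, recurse on both halves, add the counts) with a single flat scan of the inclusive range [low, high] incrementing one counter.
import Mathlib
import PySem

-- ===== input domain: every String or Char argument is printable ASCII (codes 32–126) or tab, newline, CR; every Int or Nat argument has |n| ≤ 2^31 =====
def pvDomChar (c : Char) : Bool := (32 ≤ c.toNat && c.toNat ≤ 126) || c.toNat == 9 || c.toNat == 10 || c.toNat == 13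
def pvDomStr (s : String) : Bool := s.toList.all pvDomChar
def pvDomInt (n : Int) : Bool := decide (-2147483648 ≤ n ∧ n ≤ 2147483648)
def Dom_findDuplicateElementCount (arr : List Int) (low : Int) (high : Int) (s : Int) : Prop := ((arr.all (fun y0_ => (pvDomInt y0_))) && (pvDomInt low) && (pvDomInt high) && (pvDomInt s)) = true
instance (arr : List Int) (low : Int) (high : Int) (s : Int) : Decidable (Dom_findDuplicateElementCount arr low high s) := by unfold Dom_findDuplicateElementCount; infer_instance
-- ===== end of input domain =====

-- B replaces A's divide-and-conquer recursion with a single flat counting scan of [low, high] (objective: simpler).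

-- ===== PORT A =====
-- Literal port of A's midpoint recursion. Outside Pre_ the Python raises
-- (IndexError for an out-of-range index, RecursionError for low > high); there the
-- port returns a default (pyGetD default / the 'else 0' termination guard).
def findDuplicateElementCount (arr : List Int) (low : Int) (high : Int) (s : Int) : Int :=
  if low = high then
    (if PySem.List.pyGetD arr low 0 = s then 1 else 0)
  else if low < high then
    let mid := PySem.Int.floordiv (low + high) 2
    findDuplicateElementCount arr low mid s + findDuplicateElementCount arr (mid + 1) high s
  else 0
termination_by (high - low).toNat
decreasing_by
  all_goals
    have h := PySem.Int.floordiv_two_mid_bounds (lo := low) (hi := high) (by omega)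
    have h2 : PySem.Int.floordiv (low + high) 2 < high := by
      have := PySem.Int.floordiv_eq_ediv_of_pos (a := low + high) (b := 2) (by omega)
      omega
    omega

-- ===== PORT B =====
-- Literal port of Source B's while-True scan. Python's arr[i] raises IndexError out of
-- range; the port's pyGet? returns none there and the loop stops with the current
-- count (outside Pre_). Terminates because i grows while pyGet? keeps succeeding.
def findDuplicateElementCount_altLoop (arr : List Int) (s : Int) (high : Int) (i : Int) (count : Int) : Int :=
  match hv : PySem.List.pyGet? arr i with
  | none => count          -- Python: IndexError (only outside Pre_)
  | some v =>
    let count' := if v = s then count + 1 else count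
    if i = high then count'
    else findDuplicateElementCount_altLoop arr s high (i + 1) count'
termination_by ((arr.length : Int) - i).toNat
decreasing_by
  have : PySem.Raise.InRange arr.length i := by
    by_contra hc
    rw [(PySem.List.pyGet?_eq_none_iff arr i).mpr hc] at hv
    exact absurd hv (by simp)
  unfold PySem.Raise.InRange at this
  omega

def findDuplicateElementCount_alt (arr : List Int) (low : Int) (high : Int) (s : Int) : Int :=
  findDuplicateElementCount_altLoop arr s high low 0

-- ===== PRECONDITION & SPEC =====
-- Pre_: exactly the inputs on which Python A returns: a non-empty index range low ≤ high
-- whose every index is in range for arr (negative indices count from the end).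
def Pre_findDuplicateElementCount (arr : List Int) (low : Int) (high : Int) (s : Int) : Prop :=
  low ≤ high ∧ -(arr.length : Int) ≤ low ∧ high < (arr.length : Int)
instance (arr : List Int) (low : Int) (high : Int) (s : Int) : Decidable (Pre_findDuplicateElementCount arr low high s) := by unfold Pre_findDuplicateElementCount; infer_instance

def pvWitness_findDuplicateElementCount : List Int × Int × Int × Int := ([3, 1, 3, 2, 3], 0, 4, 3)

def Spec_findDuplicateElementCount (arr : List Int) (low : Int) (high : Int) (s : Int) (out : Int) : Prop := out = findDuplicateElementCount_alt arr low high s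
instance (arr : List Int) (low : Int) (high : Int) (s : Int) (out : Int) : Decidable (Spec_findDuplicateElementCount arr low high s out) := by unfold Spec_findDuplicateElementCount; infer_instance

-- ===== CLAIM (what is proved, stated in full; the proofs are below) =====
def Claim_equal_findDuplicateElementCount : Prop := ∀ (arr : List Int) (low : Int) (high : Int) (s : Int), Dom_findDuplicateElementCount arr low high s → Pre_findDuplicateElementCount arr low high s → Spec_findDuplicateElementCount arr low high s (findDuplicateElementCount arr low high s)

-- ===== LEMMAS AND PROOFS =====

-- A computes the indicator sum over [low, high], by strong induction on the range width.
theorem fdec_eq_sum (arr : List Int) (s : Int) :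
    ∀ (n : Nat) (low high : Int), low ≤ high → (high - low).toNat = n →
      findDuplicateElementCount arr low high s
        = ((PySem.List.pyRange low (high + 1) 1).map
            (fun i => if PySem.List.pyGetD arr i 0 = s then (1 : Int) else 0)).sum := by
  intro n
  induction n using Nat.strong_induction_on with
  | _ n ih =>
    intro low high hle hn
    rcases eq_or_lt_of_le hle with heq | hlt
    · subst heq
      rw [findDuplicateElementCount, PySem.List.pyRange_one_singleton]
      simp
    · have hmid := PySem.Int.floordiv_two_mid_bounds (lo := low) (hi := high) hle
      have hlt2 : PySem.Int.floordiv (low + high) 2 < high := by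
        have := PySem.Int.floordiv_eq_ediv_of_pos (a := low + high) (b := 2) (by omega)
        omega
      set mid := PySem.Int.floordiv (low + high) 2 with hm
      have key : findDuplicateElementCount arr low high s
          = findDuplicateElementCount arr low mid s + findDuplicateElementCount arr (mid + 1) high s := by
        rw [findDuplicateElementCount, if_neg (by omega : ¬ low = high), if_pos hlt]
      rw [key]
      rw [ih (mid - low).toNat (by omega) low mid (by omega) rfl,
          ih (high - (mid + 1)).toNat (by omega) (mid + 1) high (by omega) rfl]
      rw [PySem.List.pyRange_one_append low (mid + 1) (high + 1) (by omega) (by omega)]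
      rw [List.map_append, List.sum_append]

-- B's scan computes count plus the same indicator sum, by induction on the remaining width.
theorem loopB_eq_sum (arr : List Int) (s : Int) (high : Int)
    (hhi : high < (arr.length : Int)) :
    ∀ (n : Nat) (i count : Int), i ≤ high → -(arr.length : Int) ≤ i → (high - i).toNat = n →
      findDuplicateElementCount_altLoop arr s high i count
        = count + ((PySem.List.pyRange i (high + 1) 1).map
            (fun j => if PySem.List.pyGetD arr j 0 = s then (1 : Int) else 0)).sum := by
  intro n
  induction n with
  | zero =>
    intro i count hle hlo hn
    have hi : i = high := by omega
    subst hi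
    have hin : PySem.Raise.InRange arr.length i := by
      unfold PySem.Raise.InRange; omega
    obtain ⟨v, hv⟩ := Option.ne_none_iff_exists'.mp
      (fun hnone => absurd ((PySem.List.pyGet?_eq_none_iff arr i).mp hnone) (by simpa using hin))
    have hgd : PySem.List.pyGetD arr i 0 = v := by
      simp [PySem.List.pyGetD, hv]
    rw [findDuplicateElementCount_altLoop, hv]
    simp only [if_pos (rfl : i = i), PySem.List.pyRange_one_singleton, List.map_cons, List.map_nil,
      List.sum_cons, List.sum_nil, hgd]
    split_ifs <;> ring
  | succ m ih =>
    intro i count hle hlo hn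
    have hilt : i < high := by omega
    have hin : PySem.Raise.InRange arr.length i := by
      unfold PySem.Raise.InRange; omega
    obtain ⟨v, hv⟩ := Option.ne_none_iff_exists'.mp
      (fun hnone => absurd ((PySem.List.pyGet?_eq_none_iff arr i).mp hnone) (by simpa using hin))
    have hgd : PySem.List.pyGetD arr i 0 = v := by
      simp [PySem.List.pyGetD, hv]
    rw [findDuplicateElementCount_altLoop, hv]
    simp only [if_neg (by omega : ¬ i = high)]
    rw [ih (i + 1) (if v = s then count + 1 else count) (by omega) (by omega) (by omega)]
    rw [PySem.List.pyRange_one_cons (by omega : i < high + 1)]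
    simp only [List.map_cons, List.sum_cons, hgd]
    split_ifs <;> ring

-- ===== VERDICT (by name: the statement is the Claim_ definition above) =====
theorem findDuplicateElementCount_spec : Claim_equal_findDuplicateElementCount := by
  intro arr low high s _ hpre
  obtain ⟨h1, h2, h3⟩ := hpre
  unfold Spec_findDuplicateElementCount findDuplicateElementCount_alt
  rw [fdec_eq_sum arr s (high - low).toNat low high h1 rfl,
      loopB_eq_sum arr s high h3 (high - low).toNat low 0 h1 h2 rfl]
  ring
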